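-- pv_equiv track=rewrite | github.com/CelestialPaler/NexusPlatform | nexus-platform/backend/rtp_analysis/core.py | _unwrap_sequence_numbers
-- ===== SOURCE A (Python) =====
-- def _unwrap_sequence_numbers(seq_numbers):
--     unwrapped_seq = []
--     wrap_offset = 0
--     last_seq = seq_numbers[0]
--
--     for seq in seq_numbers:
--         if seq < last_seq - 30000:
--             wrap_offset += 65536
--         elif last_seq < seq - 30000:
--              wrap_offset -= 65536
--         unwrapped_seq.append(seq + wrap_offset)
--         last_seq = seq
--     return unwrapped_seq
-- ===== SOURCE B (Python) =====
-- def _unwrap_sequence_numbers(seq_numbers):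
--     # Phase 1: per-step adjustments from consecutive pairs.
--     steps = [65536 if cur < prev - 30000 else (-65536 if prev < cur - 30000 else 0)
--              for prev, cur in zip(seq_numbers, seq_numbers[1:])]
--     # Phase 2: cumulative offsets; the first element gets no offset.
--     offsets = [0]
--     total = 0
--     for d in steps:
--         total += d
--         offsets.append(total)
--     # Phase 3: apply offsets.
--     return [s + o for s, o in zip(seq_numbers, offsets)]
-- ===== Notes on version B (the rewrite author's own statement) =====
-- stated objective: alternative
-- what changed: Replaced the single loop threading (wrap_offset, last_seq) state with three separate passes: a per-step adjustment table from consecutive pairs, a prefix-sum offset table seeded so the first element gets no offset, and a zip that applies each offset.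
import Mathlib
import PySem

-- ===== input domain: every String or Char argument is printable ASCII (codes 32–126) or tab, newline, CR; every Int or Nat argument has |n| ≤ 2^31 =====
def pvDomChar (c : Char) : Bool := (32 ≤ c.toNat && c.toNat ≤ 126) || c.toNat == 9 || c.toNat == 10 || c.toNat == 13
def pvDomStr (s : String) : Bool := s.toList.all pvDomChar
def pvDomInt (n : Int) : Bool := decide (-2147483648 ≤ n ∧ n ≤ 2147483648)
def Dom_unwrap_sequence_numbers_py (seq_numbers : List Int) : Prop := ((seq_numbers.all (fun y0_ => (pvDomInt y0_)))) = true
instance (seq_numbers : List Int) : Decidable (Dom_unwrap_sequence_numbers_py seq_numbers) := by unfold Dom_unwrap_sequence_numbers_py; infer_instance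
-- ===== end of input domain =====

-- B rebuilds the result in three passes (pair-wise adjustment table, prefix-sum offsets, zip-apply)
-- instead of A's single loop threading (wrap_offset, last_seq). Return values agree on all nonempty lists.

-- ===== PORT A =====
-- one loop iteration of A: state = (unwrapped_seq, wrap_offset, last_seq)
def unwrapStepA (st : List Int × Int × Int) (seq : Int) : List Int × Int × Int :=
  let wrap := if seq < st.2.2 - 30000 then st.2.1 + 65536
              else if st.2.2 < seq - 30000 then st.2.1 - 65536
              else st.2.1
  (st.1 ++ [seq + wrap], wrap, seq)

def unwrap_sequence_numbers_py (seq_numbers : List Int) : List Int :=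
  match PySem.List.pyGet? seq_numbers 0 with
  | none => []   -- IndexError in Python; excluded by Pre_
  | some last_seq => (seq_numbers.foldl unwrapStepA ([], 0, last_seq)).1

-- ===== PORT B =====
def unwrap_sequence_numbers_py_alt (seq_numbers : List Int) : List Int :=
  let steps := (seq_numbers.zip (PySem.List.slice seq_numbers (some 1) none)).map
      (fun p => if p.2 < p.1 - 30000 then (65536 : Int)
                else if p.1 < p.2 - 30000 then (-65536 : Int) else 0)
  let offsets := steps.foldl (fun (st : List Int × Int) d =>
      (st.1 ++ [st.2 + d], st.2 + d)) ([0], 0)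
  (seq_numbers.zip offsets.1).map (fun p => p.1 + p.2)

-- ===== PRECONDITION & SPEC =====
-- Pre_ excludes only the empty list, where A raises IndexError on its initial element access.
def Pre_unwrap_sequence_numbers_py (seq_numbers : List Int) : Prop := seq_numbers ≠ []
instance (seq_numbers : List Int) : Decidable (Pre_unwrap_sequence_numbers_py seq_numbers) := by unfold Pre_unwrap_sequence_numbers_py; infer_instance
def pvWitness_unwrap_sequence_numbers_py : List Int := [1, 65530, 3, 40000]

def Spec_unwrap_sequence_numbers_py (seq_numbers : List Int) (out : List Int) : Prop := out = unwrap_sequence_numbers_py_alt seq_numbers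
instance (seq_numbers : List Int) (out : List Int) : Decidable (Spec_unwrap_sequence_numbers_py seq_numbers out) := by unfold Spec_unwrap_sequence_numbers_py; infer_instance

-- ===== CLAIM (what is proved, stated in full; the proofs are below) =====
def Claim_equal_unwrap_sequence_numbers_py : Prop := ∀ (seq_numbers : List Int), Dom_unwrap_sequence_numbers_py seq_numbers → Pre_unwrap_sequence_numbers_py seq_numbers → Spec_unwrap_sequence_numbers_py seq_numbers (unwrap_sequence_numbers_py seq_numbers)

-- ===== LEMMAS AND PROOFS =====

-- reference recursive unwrapping of the tail, given previous element and current wrap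
def go (prev wrap : Int) : List Int → List Int
  | [] => []
  | y :: ys =>
    let w := if y < prev - 30000 then wrap + 65536
             else if prev < y - 30000 then wrap - 65536
             else wrap
    (y + w) :: go y w ys

-- per-step adjustments of the tail
def stepsOf (prev : Int) : List Int → List Int
  | [] => []
  | y :: ys =>
    (if y < prev - 30000 then (65536 : Int) else if prev < y - 30000 then -65536 else 0) :: stepsOf y ys

-- prefix sums starting from total
def psums (t : Int) : List Int → List Int
  | [] => []
  | d :: ds => (t + d) :: psums (t + d) ds

lemma foldA_eq (l : List Int) : ∀ (acc : List Int) (wrap last : Int),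
    (l.foldl unwrapStepA (acc, wrap, last)).1 = acc ++ go last wrap l := by
  induction l with
  | nil => intro acc wrap last; simp [go]
  | cons y ys ih =>
    intro acc wrap last
    simp only [List.foldl_cons, unwrapStepA, go]
    rw [ih]
    simp

lemma zip_map_eq_stepsOf (xs : List Int) : ∀ prev : Int,
    ((prev :: xs).zip xs).map
      (fun p : Int × Int => if p.2 < p.1 - 30000 then (65536 : Int)
                else if p.1 < p.2 - 30000 then (-65536 : Int) else 0) = stepsOf prev xs := by
  induction xs with
  | nil => intro prev; simp [stepsOf]
  | cons y ys ih => intro prev; simp [stepsOf, ih y]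

lemma fold_offsets (steps : List Int) : ∀ (offs : List Int) (t : Int),
    (steps.foldl (fun (st : List Int × Int) d => (st.1 ++ [st.2 + d], st.2 + d)) (offs, t)).1
      = offs ++ psums t steps := by
  induction steps with
  | nil => intro offs t; simp [psums]
  | cons d ds ih => intro offs t; simp only [List.foldl_cons, psums]; rw [ih]; simp

lemma zip_psums_eq_go (xs : List Int) : ∀ (prev w : Int),
    ((xs.zip (psums w (stepsOf prev xs))).map (fun p : Int × Int => p.1 + p.2)) = go prev w xs := by
  induction xs with
  | nil => intro prev w; simp [go]
  | cons y ys ih =>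
    intro prev w
    simp only [stepsOf, psums, List.zip_cons_cons, List.map_cons, go]
    have hw : (w + if y < prev - 30000 then (65536 : Int) else if prev < y - 30000 then -65536 else 0)
           = (if y < prev - 30000 then w + 65536 else if prev < y - 30000 then w - 65536 else w) := by
      split_ifs <;> ring
    rw [hw, ih]

-- ===== VERDICT (by name: the statement is the Claim_ definition above) =====
theorem unwrap_sequence_numbers_py_spec : Claim_equal_unwrap_sequence_numbers_py := by
  intro seq_numbers _ hpre
  unfold Spec_unwrap_sequence_numbers_py
  obtain ⟨x, xs, rfl⟩ := List.exists_cons_of_ne_nil hpre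
  unfold unwrap_sequence_numbers_py unwrap_sequence_numbers_py_alt
  simp only [PySem.List.pyGet?_zero_cons, PySem.List.slice_from_one, List.tail_cons]
  rw [zip_map_eq_stepsOf, fold_offsets]
  simp only [List.singleton_append, List.zip_cons_cons, List.map_cons]
  rw [zip_psums_eq_go]
  rw [List.foldl_cons]
  have h1 : unwrapStepA ([], 0, x) x = ([x], 0, x) := by
    simp [unwrapStepA]
    omega
  rw [h1, foldA_eq]
  simp
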